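-- pv_equiv track=rewrite | github.com/mchmir/repo-sql-py-adm | pyton/PY-ASW/parser-testproc-to-testprocex.py | format_assignments
-- ===== SOURCE A (Python) =====
-- ASSIGN_PER_LINE = 6        # сколько пар name=value на строку
--
-- def normalize_value(tok: str) -> str:
--     """Пустые -> '', null/NULL -> null, остальное оставляем как есть (числа, bool, идентификаторы, строки)."""
--     t = tok.strip()
--     if t == '':
--         return "''"
--     if t.lower() == 'null':
--         return 'null'
--     return t
--
-- def format_assignments(names, values):
--     pairs = []
--     m = min(len(names), len(values))
--     for i in range(m):
--         name = names[i].strip()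
--         if not name:
--             continue
--         val = normalize_value(values[i])
--         pairs.append(f"{name}={val}")
--     if not pairs:
--         return ''
--     chunks = []
--     for i in range(0, len(pairs), ASSIGN_PER_LINE):
--         chunks.append(','.join(pairs[i:i+ASSIGN_PER_LINE]))
--     indent = ' ' * 25
--     if len(chunks) == 1:
--         return chunks[0]
--     return (',\n' + indent).join(chunks)
-- ===== SOURCE B (Python) =====
-- ASSIGN_PER_LINE = 6        # сколько пар name=value на строку
--
-- def normalize_value(tok: str) -> str:
--     t = tok.strip()
--     if t == '':
--         return "''"
--     if t.lower() == 'null':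
--         return 'null'
--     return t
--
-- def format_assignments(names, values):
--     # single pass: emit the separator before each pair instead of chunking afterwards
--     out = ''
--     count = 0
--     indent = ' ' * 25
--     for i in range(min(len(names), len(values))):
--         name = names[i].strip()
--         if not name:
--             continue
--         val = normalize_value(values[i])
--         if count > 0:
--             out += ',\n' + indent if count % ASSIGN_PER_LINE == 0 else ','
--         out += name + '=' + val
--         count += 1
--     return out
-- ===== Notes on version B (the rewrite author's own statement) =====
-- stated objective: simpler
-- what changed: Builds the result in one pass, emitting the separator (',' or ',\n'+indent at every 6th accepted pair) before each pair, instead of building a pairs list, re-scanning it in strides of 6 into chunks, and joining the chunks.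
import Mathlib
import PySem

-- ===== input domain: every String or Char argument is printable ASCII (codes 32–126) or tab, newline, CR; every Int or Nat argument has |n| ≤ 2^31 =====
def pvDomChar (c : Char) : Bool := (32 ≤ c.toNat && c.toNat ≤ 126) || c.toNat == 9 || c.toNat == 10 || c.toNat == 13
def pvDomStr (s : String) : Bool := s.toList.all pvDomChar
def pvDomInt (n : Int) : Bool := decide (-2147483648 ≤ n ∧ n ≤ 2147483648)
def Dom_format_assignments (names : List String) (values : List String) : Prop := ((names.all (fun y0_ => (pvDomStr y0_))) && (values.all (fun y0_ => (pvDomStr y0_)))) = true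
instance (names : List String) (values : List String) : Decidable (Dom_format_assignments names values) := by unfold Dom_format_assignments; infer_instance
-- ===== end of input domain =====

-- B builds the string in a single pass, emitting each separator in place of A's pairs-list + stride-6 chunking + join; objective: simpler.

-- ===== PORT A =====

-- ' ' * 25 (shared literal, used by both ports)
def indent25 : String := "                         "

def normalize_value (tok : String) : String :=
  let t := PySem.Str.strip tok
  if t = "" then "''"
  else if PySem.Str.lower t = "null" then "null"
  else t

def format_assignments (names : List String) (values : List String) : String :=
  let pairs : List String :=
    (PySem.List.pyRange 0 (min (names.length : Int) (values.length : Int)) 1).foldl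
      (fun pairs i =>
        if PySem.Str.strip (PySem.List.pyGetD names i "") = "" then pairs
        else pairs ++ [PySem.Str.strip (PySem.List.pyGetD names i "") ++ "=" ++
                       normalize_value (PySem.List.pyGetD values i "")]) []
  if pairs = [] then ""
  else
    let chunks : List String := (PySem.List.pyRange 0 (pairs.length : Int) 6).foldl
      (fun chunks i =>
        chunks ++ [PySem.Str.join "," (PySem.List.slice pairs (some i) (some (i + 6)))]) []
    if chunks.length = 1 then chunks[0]!
    else PySem.Str.join (",\n" ++ indent25) chunks

-- ===== PORT B =====

def format_assignments_alt (names : List String) (values : List String) : String :=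
  ((PySem.List.pyRange 0 (min (names.length : Int) (values.length : Int)) 1).foldl
    (fun (st : String × Nat) i =>
      if PySem.Str.strip (PySem.List.pyGetD names i "") = "" then st
      else ((if st.2 > 0 then
               st.1 ++ (if st.2 % 6 = 0 then ",\n" ++ indent25 else ",")
             else st.1) ++
            (PySem.Str.strip (PySem.List.pyGetD names i "") ++ "=" ++
             normalize_value (PySem.List.pyGetD values i "")),
            st.2 + 1)) ("", 0)).1

-- ===== PRECONDITION & SPEC =====
def Spec_format_assignments (names : List String) (values : List String) (out : String) : Prop := out = format_assignments_alt names values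
instance (names : List String) (values : List String) (out : String) : Decidable (Spec_format_assignments names values out) := by unfold Spec_format_assignments; infer_instance

-- ===== CLAIM (what is proved, stated in full; the proofs are below) =====
def Claim_equal_format_assignments : Prop := ∀ (names : List String) (values : List String), Dom_format_assignments names values → Spec_format_assignments names values (format_assignments names values)

-- ===== LEMMAS AND PROOFS =====

-- big separator ',\n' + 25 spaces
def bigsep : String := ",\n" ++ indent25

-- separator emitted before the pair that has c accepted pairs before it
def psep (c : Nat) : String := if c = 0 then "" else if c % 6 = 0 then bigsep else ","

-- the intended result as a direct recursion over the pairs, counting accepted pairs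
def pJ : List String → Nat → String
  | [], _ => ""
  | p :: ps, c => psep c ++ p ++ pJ ps (c + 1)

-- A's chunking as a direct recursion
def chunksRec : List String → List (List String)
  | [] => []
  | p :: ps => (p :: ps).take 6 :: chunksRec ((p :: ps).drop 6)
  termination_by l => l.length
  decreasing_by simp

theorem chunksRec_nil : chunksRec [] = [] := by
  unfold chunksRec
  rfl

theorem chunksRec_cons (ps : List String) (h : ps ≠ []) :
    chunksRec ps = ps.take 6 :: chunksRec (ps.drop 6) := by
  rw [chunksRec.eq_def]
  cases ps with
  | nil => exact absurd rfl h
  | cons p t => rfl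

theorem chunksRec_ne_nil (ps : List String) (h : ps ≠ []) : chunksRec ps ≠ [] := by
  rw [chunksRec_cons ps h]; simp

theorem pr6_nil (a b : Int) (h : b ≤ a) : PySem.List.pyRange a b 6 = [] := by
  rw [PySem.List.pyRange_of_pos a b (by norm_num)]
  simp [if_neg (not_lt.mpr h)]

theorem pr6_cons (a b : Int) (h : a < b) :
    PySem.List.pyRange a b 6 = a :: PySem.List.pyRange (a + 6) b 6 := by
  rw [PySem.List.pyRange_of_pos a b (by norm_num),
      PySem.List.pyRange_of_pos (a + 6) b (by norm_num)]
  rw [if_pos h]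
  by_cases hc : a + 6 < b
  · rw [if_pos hc]
    have hn : ((b - a + 6 - 1) / 6).toNat = ((b - (a + 6) + 6 - 1) / 6).toNat + 1 := by omega
    rw [hn, List.range_succ_eq_map]
    simp only [List.map_cons, List.map_map]
    congr 1
    · simp
    · apply List.map_congr_left
      intro k _
      simp only [Function.comp_apply]
      push_cast
      ring
  · rw [if_neg hc]
    have hn : ((b - a + 6 - 1) / 6).toNat = 1 := by omega
    rw [hn]
    simp

theorem pJ_snoc (ps : List String) (p : String) : ∀ (c : Nat),
    pJ (ps ++ [p]) c = pJ ps c ++ (psep (c + ps.length) ++ p) := by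
  induction ps with
  | nil =>
      intro c
      apply String.toList_inj.mp
      simp [pJ, String.toList_append]
  | cons q t ih =>
      intro c
      simp only [List.cons_append, pJ, ih (c + 1), List.length_cons]
      have he : c + 1 + t.length = c + (t.length + 1) := by omega
      rw [he]
      apply String.toList_inj.mp
      simp [String.toList_append]

theorem pJ_chunk (ps : List String) (hps : ps ≠ []) (c : Nat) (hc : c % 6 = 0) :
    pJ ps c = psep c ++ (PySem.Str.join "," (ps.take 6) ++ pJ (ps.drop 6) (c + 6)) := by
  have e1 : psep (c + 1) = "," := by unfold psep; rw [if_neg (by omega), if_neg (by omega)]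
  have e2 : psep (c + 1 + 1) = "," := by unfold psep; rw [if_neg (by omega), if_neg (by omega)]
  have e3 : psep (c + 1 + 1 + 1) = "," := by unfold psep; rw [if_neg (by omega), if_neg (by omega)]
  have e4 : psep (c + 1 + 1 + 1 + 1) = "," := by
    unfold psep; rw [if_neg (by omega), if_neg (by omega)]
  have e5 : psep (c + 1 + 1 + 1 + 1 + 1) = "," := by
    unfold psep; rw [if_neg (by omega), if_neg (by omega)]
  have e6 : c + 1 + 1 + 1 + 1 + 1 + 1 = c + 6 := by omega
  match ps with
  | [] => exact absurd rfl hps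
  | [p1] =>
      apply String.toList_inj.mp
      simp [pJ, String.toList_append, PySem.Str.toList_join, PySem.Chars.join_singleton]
  | [p1, p2] =>
      apply String.toList_inj.mp
      simp [pJ, e1, String.toList_append, PySem.Str.toList_join, PySem.Chars.join_cons_cons,
            PySem.Chars.join_singleton]
  | [p1, p2, p3] =>
      apply String.toList_inj.mp
      simp [pJ, e1, e2, String.toList_append, PySem.Str.toList_join, PySem.Chars.join_cons_cons,
            PySem.Chars.join_singleton]
  | [p1, p2, p3, p4] =>
      apply String.toList_inj.mp
      simp [pJ, e1, e2, e3, String.toList_append, PySem.Str.toList_join,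
            PySem.Chars.join_cons_cons, PySem.Chars.join_singleton]
  | [p1, p2, p3, p4, p5] =>
      apply String.toList_inj.mp
      simp [pJ, e1, e2, e3, e4, String.toList_append, PySem.Str.toList_join,
            PySem.Chars.join_cons_cons, PySem.Chars.join_singleton]
  | p1 :: p2 :: p3 :: p4 :: p5 :: p6 :: rest =>
      apply String.toList_inj.mp
      simp [pJ, e1, e2, e3, e4, e5, e6, String.toList_append, PySem.Str.toList_join,
            PySem.Chars.join_cons_cons, PySem.Chars.join_singleton]

theorem pJ_eq_join : ∀ (k : Nat) (ps : List String), ps.length ≤ k → ∀ (c : Nat), c % 6 = 0 →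
    pJ ps c = (if ps = [] then "" else psep c) ++
      PySem.Str.join bigsep ((chunksRec ps).map (fun l => PySem.Str.join "," l)) := by
  intro k
  induction k with
  | zero =>
      intro ps hk c _
      have : ps = [] := List.eq_nil_of_length_eq_zero (by omega)
      subst this
      apply String.toList_inj.mp
      simp [pJ, chunksRec_nil, PySem.Str.toList_join, PySem.Chars.join_nil]
  | succ k ih =>
      intro ps hk c hc
      by_cases hps : ps = []
      · subst hps
        apply String.toList_inj.mp
        simp [pJ, chunksRec_nil, PySem.Str.toList_join, PySem.Chars.join_nil]
      · rw [pJ_chunk ps hps c hc, chunksRec_cons ps hps]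
        have hlen : (ps.drop 6).length ≤ k := by
          have := List.length_pos_iff.mpr hps
          simp only [List.length_drop]
          omega
        have hrec := ih (ps.drop 6) hlen (c + 6) (by omega)
        by_cases hd : ps.drop 6 = []
        · rw [hrec]
          rw [if_pos hd, hd]
          apply String.toList_inj.mp
          simp [hps, chunksRec_nil, String.toList_append, PySem.Str.toList_join,
                PySem.Chars.join_singleton, PySem.Chars.join_nil]
        · rw [hrec, if_neg hd]
          have hp6 : psep (c + 6) = bigsep := by
            unfold psep; rw [if_neg (by omega), if_pos (by omega)]
          rw [hp6]
          obtain ⟨q, rest, hqr⟩ := List.exists_cons_of_ne_nil (chunksRec_ne_nil _ hd)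
          rw [hqr]
          apply String.toList_inj.mp
          simp [hps, String.toList_append, PySem.Str.toList_join, PySem.Chars.join_cons_cons]

theorem chunkfold (ps : List String) : ∀ (k : Nat) (a : Nat) (cs : List String),
    ps.length ≤ a + 6 * k →
    (PySem.List.pyRange (a : Int) (ps.length : Int) 6).foldl
        (fun chunks i => chunks ++ [PySem.Str.join "," (PySem.List.slice ps (some i) (some (i + 6)))]) cs
      = cs ++ (chunksRec (ps.drop a)).map (fun l => PySem.Str.join "," l) := by
  intro k
  induction k with
  | zero =>
      intro a cs hk
      have hle : ps.length ≤ a := by omega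
      rw [pr6_nil _ _ (by exact_mod_cast hle)]
      rw [List.drop_eq_nil_of_le hle]
      simp [chunksRec_nil]
  | succ k ih =>
      intro a cs hk
      by_cases hab : a < ps.length
      · rw [pr6_cons _ _ (by exact_mod_cast hab)]
        simp only [List.foldl_cons]
        have hslice : PySem.List.slice ps (some (a : Int)) (some ((a : Int) + 6))
            = (ps.drop a).take 6 := by
          rw [PySem.List.slice_toNat ps (by positivity) (by positivity)]
          have h1 : ((a : Int) + 6).toNat = a + 6 := by omega
          have h2 : ((a : Int)).toNat = a := by omega
          have h3 : a + 6 - a = 6 := by omega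
          rw [h1, h2, h3]
        rw [hslice]
        have hcast : (a : Int) + 6 = ((a + 6 : Nat) : Int) := by push_cast; ring
        rw [hcast, ih (a + 6) _ (by omega)]
        have hdrop : ps.drop (a + 6) = (ps.drop a).drop 6 := by
          rw [List.drop_drop]
        have hne : ps.drop a ≠ [] := by
          intro h
          have := congrArg List.length h
          simp at this
          omega
        rw [hdrop, chunksRec_cons _ hne]
        simp
      · have hle : ps.length ≤ a := by omega
        rw [pr6_nil _ _ (by exact_mod_cast hle)]
        rw [List.drop_eq_nil_of_le hle]
        simp [chunksRec_nil]

theorem main_inv (names values : List String) : ∀ (idx : List Int) (ps : List String),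
    (idx.foldl
      (fun (st : String × Nat) i =>
        if PySem.Str.strip (PySem.List.pyGetD names i "") = "" then st
        else ((if st.2 > 0 then
                 st.1 ++ (if st.2 % 6 = 0 then ",\n" ++ indent25 else ",")
               else st.1) ++
              (PySem.Str.strip (PySem.List.pyGetD names i "") ++ "=" ++
               normalize_value (PySem.List.pyGetD values i "")),
              st.2 + 1)) (pJ ps 0, ps.length))
    = (pJ (idx.foldl
        (fun pairs i =>
          if PySem.Str.strip (PySem.List.pyGetD names i "") = "" then pairs
          else pairs ++ [PySem.Str.strip (PySem.List.pyGetD names i "") ++ "=" ++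
                         normalize_value (PySem.List.pyGetD values i "")]) ps) 0,
       (idx.foldl
        (fun pairs i =>
          if PySem.Str.strip (PySem.List.pyGetD names i "") = "" then pairs
          else pairs ++ [PySem.Str.strip (PySem.List.pyGetD names i "") ++ "=" ++
                         normalize_value (PySem.List.pyGetD values i "")]) ps).length) := by
  intro idx
  induction idx with
  | nil => intro ps; simp
  | cons i rest ih =>
      intro ps
      simp only [List.foldl_cons]
      by_cases hname : PySem.Str.strip (PySem.List.pyGetD names i "") = ""
      · rw [if_pos hname, if_pos hname]
        exact ih ps
      · rw [if_neg hname, if_neg hname]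
        have hstep :
            ((if ps.length > 0 then
                pJ ps 0 ++ (if ps.length % 6 = 0 then ",\n" ++ indent25 else ",")
              else pJ ps 0) ++
             (PySem.Str.strip (PySem.List.pyGetD names i "") ++ "=" ++
              normalize_value (PySem.List.pyGetD values i "")),
             ps.length + 1)
            = (pJ (ps ++ [PySem.Str.strip (PySem.List.pyGetD names i "") ++ "=" ++
                          normalize_value (PySem.List.pyGetD values i "")]) 0,
               (ps ++ [PySem.Str.strip (PySem.List.pyGetD names i "") ++ "=" ++
                       normalize_value (PySem.List.pyGetD values i "")]).length) := by
          refine Prod.ext ?_ (by simp)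
          simp only
          rw [pJ_snoc ps _ 0]
          apply String.toList_inj.mp
          unfold psep bigsep
          by_cases h0 : ps.length = 0
          · simp [h0, String.toList_append]
          · by_cases h6 : ps.length % 6 = 0
            · simp [h0, h6, Nat.pos_of_ne_zero h0, String.toList_append]
            · simp [h0, h6, Nat.pos_of_ne_zero h0, String.toList_append]
        rw [hstep]
        exact ih _

-- ===== VERDICT (by name: the statement is the Claim_ definition above) =====
theorem format_assignments_spec : Claim_equal_format_assignments := by
  intro names values _
  unfold Spec_format_assignments format_assignments format_assignments_alt
  simp only
  have h0 : (("" : String), (0 : Nat)) = (pJ ([] : List String) 0, ([] : List String).length) := by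
    simp [pJ]
  rw [h0, main_inv names values _ []]
  set ps := ((PySem.List.pyRange 0 (min (names.length : Int) (values.length : Int)) 1).foldl
      (fun pairs i =>
        if PySem.Str.strip (PySem.List.pyGetD names i "") = "" then pairs
        else pairs ++ [PySem.Str.strip (PySem.List.pyGetD names i "") ++ "=" ++
                       normalize_value (PySem.List.pyGetD values i "")]) []) with hps
  by_cases hnil : ps = []
  · simp [hnil, pJ]
  · rw [if_neg hnil]
    have hch := chunkfold ps ps.length 0 [] (by omega)
    rw [Nat.cast_zero] at hch
    simp only [List.nil_append, List.drop_zero] at hch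
    rw [hch]
    have hjoin := pJ_eq_join ps.length ps (le_refl _) 0 (by omega)
    rw [if_neg hnil] at hjoin
    have hpsep0 : psep 0 = "" := by unfold psep; simp
    rw [hpsep0] at hjoin
    obtain ⟨q, rest, hqr⟩ := List.exists_cons_of_ne_nil (chunksRec_ne_nil ps hnil)
    by_cases hone : ((chunksRec ps).map (fun l => PySem.Str.join "," l)).length = 1
    · rw [if_pos hone]
      rw [hqr] at hjoin hone ⊢
      have hrest : rest = [] := by simpa using hone
      subst hrest
      rw [hjoin]
      apply String.toList_inj.mp
      simp [String.toList_append, PySem.Str.toList_join, PySem.Chars.join_singleton, bigsep]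
    · rw [if_neg hone, hjoin]
      apply String.toList_inj.mp
      simp [String.toList_append, bigsep, PySem.Str.toList_join]
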